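-- pv_equiv track=rewrite | github.com/ryanmt95/adventOfCode2021 | day_2/day_2.py | dive2
-- ===== SOURCE A (Python) =====
-- def dive2(directions):
--
--     x, y, aim = 0, 0, 0
--
--     for direction, magnitude in directions:
--         if direction == 'forward':
--             x += magnitude
--             y += aim * magnitude
--         elif direction == 'down':
--             aim += magnitude
--         elif direction == 'up':
--             aim -= magnitude
--         else:
--             continue
--
--     return x * y
-- ===== SOURCE B (Python) =====
-- def dive2(directions):
--     # Pass 1: prefix-scan of aim deltas -> aim in effect at each entry.
--     aims = []
--     a = 0
--     for d, m in directions: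
--         aims.append(a)
--         if d == 'down':
--             a += m
--         elif d == 'up':
--             a -= m
--     # Pass 2: fold over forward entries only.
--     x = sum(m for (d, m), _ in zip(directions, aims) if d == 'forward')
--     y = sum(aim * m for (d, m), aim in zip(directions, aims) if d == 'forward')
--     return x * y
-- ===== Notes on version B (the rewrite author's own statement) =====
-- stated objective: alternative
-- what changed: Replaces the single interleaved x/y/aim loop by a prefix-scan building the aim table, then two zip-and-filter sums over forward entries only.
import Mathlib
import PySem

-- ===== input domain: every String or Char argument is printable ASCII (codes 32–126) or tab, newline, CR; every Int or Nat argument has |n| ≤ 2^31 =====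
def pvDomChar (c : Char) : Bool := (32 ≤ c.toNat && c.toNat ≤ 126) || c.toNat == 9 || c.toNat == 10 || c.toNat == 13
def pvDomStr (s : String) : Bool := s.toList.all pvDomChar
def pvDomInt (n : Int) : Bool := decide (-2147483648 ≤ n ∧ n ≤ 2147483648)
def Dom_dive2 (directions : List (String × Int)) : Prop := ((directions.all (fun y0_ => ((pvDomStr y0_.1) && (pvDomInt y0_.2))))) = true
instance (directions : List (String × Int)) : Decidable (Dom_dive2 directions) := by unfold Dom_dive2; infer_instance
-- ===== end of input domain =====

-- B replaces A's single interleaved loop by a prefix-scan of aim values plus two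
-- filtered sums over forward entries (alternative decomposition, same cost).

-- ===== PORT A =====
def dive2Step (s : Int × Int × Int) (dm : String × Int) : Int × Int × Int :=
  if dm.1 == "forward" then (s.1 + dm.2, s.2.1 + s.2.2 * dm.2, s.2.2)
  else if dm.1 == "down" then (s.1, s.2.1, s.2.2 + dm.2)
  else if dm.1 == "up" then (s.1, s.2.1, s.2.2 - dm.2)
  else s

def dive2 (directions : List (String × Int)) : Int :=
  let st := directions.foldl dive2Step (0, 0, 0)
  st.1 * st.2.1

-- ===== PORT B =====
-- pass 1: the loop appending the current aim, then updating it
def dive2ScanStep (s : Int × List Int) (dm : String × Int) : Int × List Int :=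
  let s' := (s.1, s.2 ++ [s.1])
  if dm.1 == "down" then (s'.1 + dm.2, s'.2)
  else if dm.1 == "up" then (s'.1 - dm.2, s'.2)
  else s'

def dive2_alt (directions : List (String × Int)) : Int :=
  let aims := (directions.foldl dive2ScanStep (0, [])).2
  let fwd := (directions.zip aims).filter (fun p => p.1.1 == "forward")
  let x := fwd.foldl (fun s p => s + p.1.2) 0
  let y := fwd.foldl (fun s p => s + p.2 * p.1.2) 0
  x * y

-- ===== PRECONDITION & SPEC =====
def Spec_dive2 (directions : List (String × Int)) (out : Int) : Prop := out = dive2_alt directions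
instance (directions : List (String × Int)) (out : Int) : Decidable (Spec_dive2 directions out) := by unfold Spec_dive2; infer_instance

-- ===== CLAIM (what is proved, stated in full; the proofs are below) =====
def Claim_equal_dive2 : Prop := ∀ (directions : List (String × Int)), Dom_dive2 directions → Spec_dive2 directions (dive2 directions)

-- ===== LEMMAS AND PROOFS =====

-- closed characterisations used by both sides
def pvF : List (String × Int) → Int
  | [] => 0
  | (d, m) :: t => (if d == "forward" then m else 0) + pvF t

def pvG : Int → List (String × Int) → Int
  | _, [] => 0
  | a, (d, m) :: t =>
    if d == "forward" then a * m + pvG a t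
    else if d == "down" then pvG (a + m) t
    else if d == "up" then pvG (a - m) t
    else pvG a t

def pvD : List (String × Int) → Int
  | [] => 0
  | (d, m) :: t => (if d == "down" then m else if d == "up" then -m else 0) + pvD t

def pvAims : Int → List (String × Int) → List Int
  | _, [] => []
  | a, (d, m) :: t =>
    a :: (if d == "down" then pvAims (a + m) t
          else if d == "up" then pvAims (a - m) t
          else pvAims a t)

theorem foldA_eq (l : List (String × Int)) :
    ∀ x y a, List.foldl dive2Step (x, y, a) l = (x + pvF l, y + pvG a l, a + pvD l) := by
  induction l with
  | nil => intro x y a; simp [pvF, pvG, pvD]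
  | cons h t ih =>
    intro x y a
    obtain ⟨d, m⟩ := h
    simp only [List.foldl_cons, dive2Step, pvF, pvG, pvD]
    by_cases hf : d = "forward"
    · subst hf
      simp [ih, Prod.ext_iff]
      and_intros <;> first | ring | trivial
    · by_cases hd : d = "down"
      · subst hd
        simp [ih, Prod.ext_iff]
        and_intros <;> first | ring | trivial
      · by_cases hu : d = "up"
        · subst hu
          simp [ih, Prod.ext_iff, sub_eq_add_neg]
          and_intros <;> first | ring | trivial
        · simp [hf, hd, hu, ih]

theorem scan_eq (l : List (String × Int)) :
    ∀ a acc, (List.foldl dive2ScanStep (a, acc) l).2 = acc ++ pvAims a l := by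
  induction l with
  | nil => intro a acc; simp [pvAims]
  | cons h t ih =>
    intro a acc
    obtain ⟨d, m⟩ := h
    simp only [List.foldl_cons, dive2ScanStep, pvAims]
    by_cases hd : d == "down"
    · simp [hd, ih]
    · by_cases hu : d == "up"
      · simp [hd, hu, ih]
      · simp [hd, hu, ih]

theorem sumx_eq (l : List (String × Int)) :
    ∀ a s, ((l.zip (pvAims a l)).filter (fun p => p.1.1 == "forward")).foldl
        (fun s p => s + p.1.2) s = s + pvF l := by
  induction l with
  | nil => intro a s; simp [pvAims, pvF]
  | cons h t ih =>
    intro a s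
    obtain ⟨d, m⟩ := h
    simp only [pvAims, pvF, List.zip_cons_cons, List.filter_cons]
    by_cases hf : d == "forward"
    · have hd : (d == "down") = false := by
        cases hb : d == "down" <;> simp_all
      have hu : (d == "up") = false := by
        cases hb : d == "up" <;> simp_all
      simp [hf, hd, hu, ih, add_assoc]
    · by_cases hd : d == "down"
      · simp [hf, hd, ih]
      · by_cases hu : d == "up"
        · simp [hf, hd, hu, ih]
        · simp [hf, hd, hu, ih]

theorem sumy_eq (l : List (String × Int)) :
    ∀ a s, ((l.zip (pvAims a l)).filter (fun p => p.1.1 == "forward")).foldl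
        (fun s p => s + p.2 * p.1.2) s = s + pvG a l := by
  induction l with
  | nil => intro a s; simp [pvAims, pvG]
  | cons h t ih =>
    intro a s
    obtain ⟨d, m⟩ := h
    simp only [pvAims, pvG, List.zip_cons_cons, List.filter_cons]
    by_cases hf : d == "forward"
    · have hd : (d == "down") = false := by
        cases hb : d == "down" <;> simp_all
      have hu : (d == "up") = false := by
        cases hb : d == "up" <;> simp_all
      simp [hf, hd, hu, ih, add_assoc]
    · by_cases hd : d == "down"
      · simp [hf, hd, ih]
      · by_cases hu : d == "up"
        · simp [hf, hd, hu, ih]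
        · simp [hf, hd, hu, ih]

-- ===== VERDICT (by name: the statement is the Claim_ definition above) =====
theorem dive2_spec : Claim_equal_dive2 := by
  intro directions _
  unfold Spec_dive2 dive2 dive2_alt
  rw [foldA_eq, scan_eq]
  simp [sumx_eq, sumy_eq]
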